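-- pv_equiv track=rewrite | github.com/Wasilonek/SRIR | webservices/server.py | transpose_diff
-- ===== SOURCE A (Python) =====
-- def transpose_diff(diff):
--     first_line = ""
--     second_line = ""
--     all_lines = ""
--     checker = ''
--     for d in diff:
--         checker = d[2]
--         first_line += d[2]
--         if d[2] != "\n":
--             second_line += d[0]
--         else:
--             all_lines += first_line + second_line + "\n"
--             first_line = ""
--             second_line = ""
--     if checker != "\n":
--         first_line += "\n"
--     all_lines += first_line + second_line + "\n"
--     return all_lines
-- ===== SOURCE B (Python) =====
-- def transpose_diff(diff):
--     # Two-pass: partition diff into newline-terminated groups, then render each group.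
--     groups = []
--     cur = []
--     checker = ''
--     for d in diff:
--         checker = d[2]
--         cur.append(d)
--         if d[2] == "\n":
--             groups.append(cur)
--             cur = []
--
--     def line(g, extra):
--         col2 = ''.join(x[2] for x in g) + ("\n" if extra else "")
--         col0 = ''.join(x[0] for x in g if x[2] != "\n")
--         return col2 + col0 + "\n"
--
--     return ''.join(line(g, False) for g in groups) + line(cur, checker != "\n")
-- ===== Notes on version B (the rewrite author's own statement) =====
-- stated objective: alternative
-- what changed: A builds and flushes two running line buffers inside one loop; B first partitions the diff into newline-terminated groups in one pass, then renders each group into its line in a second pass.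
import Mathlib
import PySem

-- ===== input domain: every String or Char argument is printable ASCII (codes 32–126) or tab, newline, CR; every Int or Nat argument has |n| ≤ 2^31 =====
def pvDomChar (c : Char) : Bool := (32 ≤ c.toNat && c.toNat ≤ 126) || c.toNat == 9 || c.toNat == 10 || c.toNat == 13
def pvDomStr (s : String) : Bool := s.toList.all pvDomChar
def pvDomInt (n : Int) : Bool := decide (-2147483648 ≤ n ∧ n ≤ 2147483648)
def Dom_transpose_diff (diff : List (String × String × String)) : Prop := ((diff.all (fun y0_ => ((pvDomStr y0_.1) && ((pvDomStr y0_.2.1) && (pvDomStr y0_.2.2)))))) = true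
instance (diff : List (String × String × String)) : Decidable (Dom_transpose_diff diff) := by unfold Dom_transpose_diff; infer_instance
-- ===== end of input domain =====

-- B changes the decomposition: it first partitions the diff into newline-terminated
-- groups in one pass and then renders each group, instead of A's single loop that
-- accumulates and flushes two line buffers ('alternative', same cost).

-- ===== PORT A =====
-- A's loop state: (first_line, second_line, all_lines, checker); strings are kept
-- as List Char (exact: String.toList/String.ofList) so the kernel can unfold appends.
def tdStepA (st : List Char × List Char × List Char × String)
    (d : String × String × String) : List Char × List Char × List Char × String :=
  let f := st.1 ++ d.2.2.toList
  if d.2.2 ≠ "\n" then (f, st.2.1 ++ d.1.toList, st.2.2.1, d.2.2)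
  else ([], [], st.2.2.1 ++ f ++ st.2.1 ++ ['\n'], d.2.2)

def transpose_diff (diff : List (String × String × String)) : String :=
  let st := diff.foldl tdStepA ([], [], [], "")
  let f := if st.2.2.2 ≠ "\n" then st.1 ++ ['\n'] else st.1
  String.ofList (st.2.2.1 ++ f ++ st.2.1 ++ ['\n'])

-- ===== PORT B =====
-- B's loop state: (closed groups, current group, checker).
def tdStepB (st : List (List (String × String × String)) × List (String × String × String) × String)
    (d : String × String × String) : List (List (String × String × String)) × List (String × String × String) × String :=
  let cur := st.2.1 ++ [d]
  if d.2.2 == "\n" then (st.1 ++ [cur], [], d.2.2) else (st.1, cur, d.2.2)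

def tdLine (g : List (String × String × String)) (extra : Bool) : List Char :=
  (g.flatMap (fun x => x.2.2.toList)) ++ (if extra then ['\n'] else []) ++
  ((g.filter (fun x => x.2.2 ≠ "\n")).flatMap (fun x => x.1.toList)) ++ ['\n']

def transpose_diff_alt (diff : List (String × String × String)) : String :=
  let st := diff.foldl tdStepB ([], [], "")
  String.ofList ((st.1.flatMap (fun g => tdLine g false)) ++ tdLine st.2.1 (st.2.2 ≠ "\n"))

-- ===== PRECONDITION & SPEC =====
def Spec_transpose_diff (diff : List (String × String × String)) (out : String) : Prop := out = transpose_diff_alt diff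
instance (diff : List (String × String × String)) (out : String) : Decidable (Spec_transpose_diff diff out) := by unfold Spec_transpose_diff; infer_instance

-- ===== CLAIM (what is proved, stated in full; the proofs are below) =====
def Claim_equal_transpose_diff : Prop := ∀ (diff : List (String × String × String)), Dom_transpose_diff diff → Spec_transpose_diff diff (transpose_diff diff)

-- ===== LEMMAS AND PROOFS =====

-- column-2 and column-0 renderings of a (current) group
def tdC2 (g : List (String × String × String)) : List Char :=
  g.flatMap (fun x => x.2.2.toList)
def tdC0 (g : List (String × String × String)) : List Char :=
  (g.filter (fun x => x.2.2 ≠ "\n")).flatMap (fun x => x.1.toList)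
def tdR (gs : List (List (String × String × String))) : List Char :=
  gs.flatMap (fun g => tdLine g false)


-- loop invariant: A's fold state is the rendering of B's fold state
lemma td_key (diff : List (String × String × String)) :
    ∀ (gs : List (List (String × String × String))) (cur : List (String × String × String)) (ch : String),
    diff.foldl tdStepA (tdC2 cur, tdC0 cur, tdR gs, ch)
      = (tdC2 (diff.foldl tdStepB (gs, cur, ch)).2.1,
         tdC0 (diff.foldl tdStepB (gs, cur, ch)).2.1,
         tdR (diff.foldl tdStepB (gs, cur, ch)).1,
         (diff.foldl tdStepB (gs, cur, ch)).2.2) := by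
  induction diff with
  | nil => intro gs cur ch; simp
  | cons d rest ih =>
    intro gs cur ch
    by_cases hnl : d.2.2 = "\n"
    · have hA : tdStepA (tdC2 cur, tdC0 cur, tdR gs, ch) d
          = (tdC2 ([] : List (String × String × String)), tdC0 ([] : List (String × String × String)),
             tdR (gs ++ [cur ++ [d]]), d.2.2) := by
        simp [tdStepA, tdR, tdLine, tdC2, tdC0, hnl]
      have hB : tdStepB (gs, cur, ch) d = (gs ++ [cur ++ [d]], ([] : List (String × String × String)), d.2.2) := by
        simp [tdStepB, hnl]
      simp only [List.foldl_cons, hA, hB]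
      exact ih _ _ _
    · have hA : tdStepA (tdC2 cur, tdC0 cur, tdR gs, ch) d
          = (tdC2 (cur ++ [d]), tdC0 (cur ++ [d]), tdR gs, d.2.2) := by
        simp [tdStepA, hnl, tdC2, tdC0]
      have hB : tdStepB (gs, cur, ch) d = (gs, cur ++ [d], d.2.2) := by
        simp [tdStepB, hnl]
      simp only [List.foldl_cons, hA, hB]
      exact ih _ _ _

-- ===== VERDICT (by name: the statement is the Claim_ definition above) =====
theorem transpose_diff_spec : Claim_equal_transpose_diff := by
  intro diff _
  show transpose_diff diff = transpose_diff_alt diff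
  have h := td_key diff [] [] ""
  simp only [tdC2, tdC0, tdR, List.flatMap_nil, List.filter_nil] at h
  unfold transpose_diff transpose_diff_alt
  rw [h]
  rcases hB : diff.foldl tdStepB ([], [], "") with ⟨gs, cur, ch⟩
  by_cases hch : ch = "\n" <;>
    simp [hch, tdLine]
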